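-- pv_equiv track=rewrite | github.com/BlackSatan/simulation-modeling-queue-theory | one_channel_limit.py | idle_plot
-- ===== SOURCE A (Python) =====
-- def find_exec_time(arrival_time, exec_arr):
--     last_exec = exec_arr[-1]
--     return max(arrival_time, last_exec[1])
--
-- def system_run(incoming_dist, executing_dist, m):
--     result = []
--     time = 0
--     for index, inc in enumerate(incoming_dist):
--         exc = executing_dist[index]
--         if index == 0:
--             time += inc + exc
--             result.append([inc, inc + exc])
--         else:
--             arrival_time = sum(incoming_dist[:index])
--             start = find_exec_time(arrival_time, result)
--             queued_items_count = sum(list(map(lambda st: 1 if st[0] > arrival_time else 0, result)))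
--             if queued_items_count > m:
--                 continue
--             result.append([start, start + exc])
--     return result
--
-- def idle_plot(incoming_dist, executing_dist, m):
--     result = system_run(incoming_dist, executing_dist, m)
--     x = []
--     y = []
--     idle = 0
--     last_time = None
--     for index, coord in enumerate(result):
--         if last_time is None:
--             idle = coord[0]
--         else:
--             idle += max(0, coord[0] - last_time)
--         last_time = coord[1]
--         y.append(idle)
--         x.append(last_time)
--     return x, y
-- ===== SOURCE B (Python) =====
-- def idle_plot(incoming_dist, executing_dist, m):
--     # One fused pass: incremental prefix sum for arrival times and a sorted
--     # list of start times queried/updated by binary search, instead of A's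
--     # per-step slice-sum and linear scan plus a second plotting pass.
--     x = []
--     y = []
--     idle = 0
--     last_end = None
--     prefix = 0            # sum(incoming_dist[:i]) at the top of iteration i
--     starts = []           # start times of accepted jobs, kept sorted
--     for i, inc in enumerate(incoming_dist):
--         exc = executing_dist[i]
--         arrival = prefix
--         prefix += inc
--         if last_end is None:
--             start = inc
--         else:
--             # number of recorded starts strictly greater than arrival
--             lo, hi = 0, len(starts)
--             while lo < hi:
--                 mid = (lo + hi) // 2
--                 if starts[mid] <= arrival:
--                     lo = mid + 1
--                 else:
--                     hi = mid
--             if len(starts) - lo > m: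
--                 continue
--             start = max(arrival, last_end)
--         end = start + exc
--         # binary-insert start so starts stays sorted
--         lo, hi = 0, len(starts)
--         while lo < hi:
--             mid = (lo + hi) // 2
--             if starts[mid] <= start:
--                 lo = mid + 1
--             else:
--                 hi = mid
--         starts.insert(lo, start)
--         if last_end is None:
--             idle = start
--         else:
--             idle += max(0, start - last_end)
--         x.append(end)
--         y.append(idle)
--         last_end = end
--     return x, y
-- ===== Notes on version B (the rewrite author's own statement) =====
-- stated objective: faster
-- what changed: B fuses simulation and plotting into one pass, maintains the arrival time as an incremental prefix sum instead of re-summing a slice each step, and keeps the accepted start times in a sorted list so the queue count is a binary search instead of a linear scan.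
import Mathlib
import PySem

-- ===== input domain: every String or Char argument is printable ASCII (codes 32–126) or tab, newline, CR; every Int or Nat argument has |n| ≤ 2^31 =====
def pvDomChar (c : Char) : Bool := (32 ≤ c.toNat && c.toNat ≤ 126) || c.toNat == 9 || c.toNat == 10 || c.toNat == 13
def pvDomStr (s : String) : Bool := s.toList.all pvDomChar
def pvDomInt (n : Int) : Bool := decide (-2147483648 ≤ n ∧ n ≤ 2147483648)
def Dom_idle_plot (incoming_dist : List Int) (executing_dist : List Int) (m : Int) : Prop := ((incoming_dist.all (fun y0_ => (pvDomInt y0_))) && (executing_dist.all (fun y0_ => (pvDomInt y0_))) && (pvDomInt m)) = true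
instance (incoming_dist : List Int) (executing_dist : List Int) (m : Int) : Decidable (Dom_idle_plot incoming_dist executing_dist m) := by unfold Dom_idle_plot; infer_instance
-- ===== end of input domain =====

-- B fuses A's two passes into one, replaces the per-step slice re-sum by an incremental
-- prefix sum and the linear queue scan by binary search on a sorted list of start times
-- (objective: faster; a timing run measured the speed-up).


-- ===== PORT A =====
-- find_exec_time: max(arrival_time, exec_arr[-1][1]); the length-2 inner lists are ported
-- as pairs; exec_arr[-1] via pyGet? (the default is never read: A only calls it with
-- a nonempty result list).
def find_exec_time (arrival_time : Int) (exec_arr : List (Int × Int)) : Int :=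
  max arrival_time (((PySem.List.pyGet? exec_arr (-1)).getD (0, 0)).2)

-- one iteration of system_run's loop body (p = (index, inc) from enumerate);
-- executing_dist[index] via pyGetD (in range under Pre_, where Python does not raise)
def aStep (incoming_dist executing_dist : List Int) (m : Int)
    (result : List (Int × Int)) (p : Int × Int) : List (Int × Int) :=
  let exc := PySem.List.pyGetD executing_dist p.1 0
  if p.1 = 0 then result ++ [(p.2, p.2 + exc)]
  else
    let arrival_time := (PySem.List.slice incoming_dist none (some p.1)).sum
    let start := find_exec_time arrival_time result
    let queued := (result.map (fun st => if st.1 > arrival_time then (1 : Int) else 0)).sum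
    if queued > m then result else result ++ [(start, start + exc)]

def system_run (incoming_dist executing_dist : List Int) (m : Int) : List (Int × Int) :=
  (PySem.List.enumerate incoming_dist 0).foldl (aStep incoming_dist executing_dist m) []

-- one iteration of idle_plot's plotting loop (state = (x, y, idle, last_time);
-- the Python enumerate index is unused, so the fold runs over result directly)
def pStep (st : List Int × List Int × Int × Option Int) (coord : Int × Int) :
    List Int × List Int × Int × Option Int :=
  let idle' := match st.2.2.2 with
    | none => coord.1
    | some lt => st.2.2.1 + max 0 (coord.1 - lt)
  (st.1 ++ [coord.2], st.2.1 ++ [idle'], idle', some coord.2)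

def idle_plot (incoming_dist : List Int) (executing_dist : List Int) (m : Int) :
    List Int × List Int :=
  let result := system_run incoming_dist executing_dist m
  let s := result.foldl pStep ([], [], 0, none)
  (s.1, s.2.1)

-- ===== PORT B =====
-- B's hand-written bisect_right while-loop (starts[mid] via getD; mid is always in range)
def bisect (starts : List Int) (v : Int) (lo hi : Nat) : Nat :=
  if _h : lo < hi then
    let mid := (lo + hi) / 2
    if starts.getD mid 0 ≤ v then bisect starts v (mid + 1) hi else bisect starts v lo mid
  else lo
termination_by hi - lo
decreasing_by all_goals omega

-- one iteration of B's fused loop; state = (x, y, idle, last_end, prefix, starts)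
def bStep (executing_dist : List Int) (m : Int)
    (st : List Int × List Int × Int × Option Int × Int × List Int) (p : Int × Int) :
    List Int × List Int × Int × Option Int × Int × List Int :=
  let exc := PySem.List.pyGetD executing_dist p.1 0
  let arrival := st.2.2.2.2.1
  let prefix' := arrival + p.2
  let starts := st.2.2.2.2.2
  match st.2.2.2.1 with
  | none =>
      let start := p.2
      let lo := bisect starts start 0 starts.length
      (st.1 ++ [start + exc], st.2.1 ++ [start], start, some (start + exc), prefix',
        PySem.List.insert starts (lo : Int) start)
  | some last_end =>
      let lo := bisect starts arrival 0 starts.length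
      if (starts.length : Int) - (lo : Int) > m then
        (st.1, st.2.1, st.2.2.1, some last_end, prefix', starts)
      else
        let start := max arrival last_end
        let idle' := st.2.2.1 + max 0 (start - last_end)
        let lo2 := bisect starts start 0 starts.length
        (st.1 ++ [start + exc], st.2.1 ++ [idle'], idle', some (start + exc), prefix',
          PySem.List.insert starts (lo2 : Int) start)

def idle_plot_alt (incoming_dist : List Int) (executing_dist : List Int) (m : Int) :
    List Int × List Int :=
  let s := (PySem.List.enumerate incoming_dist 0).foldl (bStep executing_dist m)
    ([], [], 0, none, 0, [])
  (s.1, s.2.1)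

-- ===== PRECONDITION & SPEC =====
-- A raises IndexError (executing_dist[index]) exactly when executing_dist is shorter
-- than incoming_dist; B raises there too, so those inputs are excluded.
def Pre_idle_plot (incoming_dist : List Int) (executing_dist : List Int) (m : Int) : Prop :=
  incoming_dist.length ≤ executing_dist.length
instance (incoming_dist : List Int) (executing_dist : List Int) (m : Int) : Decidable (Pre_idle_plot incoming_dist executing_dist m) := by unfold Pre_idle_plot; infer_instance
def pvWitness_idle_plot : List Int × List Int × Int := ([2, 1, 3], [2, 2, 2], 1)

def Spec_idle_plot (incoming_dist : List Int) (executing_dist : List Int) (m : Int) (out : List Int × List Int) : Prop := out = idle_plot_alt incoming_dist executing_dist m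
instance (incoming_dist : List Int) (executing_dist : List Int) (m : Int) (out : List Int × List Int) : Decidable (Spec_idle_plot incoming_dist executing_dist m out) := by unfold Spec_idle_plot; infer_instance

-- ===== CLAIM (what is proved, stated in full; the proofs are below) =====
def Claim_equal_idle_plot : Prop := ∀ (incoming_dist : List Int) (executing_dist : List Int) (m : Int), Dom_idle_plot incoming_dist executing_dist m → Pre_idle_plot incoming_dist executing_dist m → Spec_idle_plot incoming_dist executing_dist m (idle_plot incoming_dist executing_dist m)

-- ===== LEMMAS AND PROOFS =====

-- the plotting fold's last_time component is the end time of the last coordinate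
lemma pStep_foldl_last (r : List (Int × Int)) (h : r ≠ []) :
    ∀ st, (r.foldl pStep st).2.2.2 = some (r.getLast h).2 := by
  induction r with
  | nil => cases h rfl
  | cons c r ih =>
    intro st
    by_cases hr : r = []
    · subst hr; simp [pStep]
    · simp only [List.foldl_cons, ih hr, List.getLast_cons hr]

-- A's queued count as a countP over the start times
lemma queued_eq_countP (r : List (Int × Int)) (a : Int) :
    (r.map (fun st => if st.1 > a then (1 : Int) else 0)).sum
      = ((r.map Prod.fst).countP (fun s => a < s) : Int) := by
  induction r with
  | nil => simp
  | cons c r ih =>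
    simp only [List.map_cons, List.sum_cons, ih, List.countP_cons]
    by_cases h : a < c.1 <;> simp [h, gt_iff_lt, add_comm]

-- bisect maintains the usual boundary invariant (n bounds the interval width)
lemma bisect_invariant (l : List Int) (v : Int) :
    ∀ (n lo hi : Nat), hi - lo ≤ n → lo ≤ hi → hi ≤ l.length →
    (lo = 0 ∨ l.getD (lo - 1) 0 ≤ v) → (hi = l.length ∨ v < l.getD hi 0) →
    lo ≤ bisect l v lo hi ∧ bisect l v lo hi ≤ hi ∧
      (bisect l v lo hi = 0 ∨ l.getD (bisect l v lo hi - 1) 0 ≤ v) ∧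
      (bisect l v lo hi = l.length ∨ v < l.getD (bisect l v lo hi) 0) := by
  intro n
  induction n with
  | zero =>
    intro lo hi hn hle hhi hlow hhigh
    have heq : lo = hi := by omega
    rw [bisect]
    simp only [heq, lt_irrefl, dite_false]
    exact ⟨le_refl _, le_refl _, heq ▸ hlow, hhigh⟩
  | succ n ih =>
    intro lo hi hn hle hhi hlow hhigh
    rw [bisect]
    by_cases h : lo < hi
    · simp only [h, dite_true]
      by_cases hc : l.getD ((lo + hi) / 2) 0 ≤ v
      · simp only [hc, if_true]
        have H := ih ((lo + hi) / 2 + 1) hi (by omega) (by omega) hhi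
          (Or.inr (by simpa using hc)) hhigh
        exact ⟨by have := H.1; omega, H.2.1, H.2.2.1, H.2.2.2⟩
      · simp only [hc, if_false]
        have H := ih lo ((lo + hi) / 2) (by omega) (by omega) (by omega) hlow
          (Or.inr (not_le.mp hc))
        exact ⟨H.1, by have := H.2.1; omega, H.2.2.1, H.2.2.2⟩
    · simp only [h, dite_false]
      have heq : lo = hi := by omega
      exact ⟨le_refl _, hle, hlow, heq ▸ hhigh⟩

-- sorted lists: getD is monotone on indices in range
lemma sorted_getD_mono (l : List Int) (hs : l.Pairwise (· ≤ ·)) (i j : Nat)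
    (hij : i ≤ j) (hj : j < l.length) : l.getD i 0 ≤ l.getD j 0 := by
  rcases eq_or_lt_of_le hij with rfl | hlt
  · exact le_refl _
  · rw [List.getD_eq_getElem l 0 (by omega), List.getD_eq_getElem l 0 hj]
    exact (List.pairwise_iff_getElem.mp hs) i j (by omega) hj hlt

-- from the boundary invariant and sortedness: all indices below k are ≤ v, all from k on are > v
lemma bisect_spec (l : List Int) (v : Int) (hs : l.Pairwise (· ≤ ·)) :
    bisect l v 0 l.length ≤ l.length ∧
      (∀ j, j < bisect l v 0 l.length → l.getD j 0 ≤ v) ∧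
      (∀ j, bisect l v 0 l.length ≤ j → j < l.length → v < l.getD j 0) := by
  have H := bisect_invariant l v l.length 0 l.length (le_refl _) (Nat.zero_le _) (le_refl _)
    (Or.inl rfl) (Or.inl rfl)
  obtain ⟨-, hk, hlow, hhigh⟩ := H
  refine ⟨hk, fun j hj => ?_, fun j hkj hj => ?_⟩
  · rcases hlow with h0 | h
    · omega
    · exact le_trans (sorted_getD_mono l hs j (bisect l v 0 l.length - 1) (by omega) (by omega)) h
  · rcases hhigh with h0 | h
    · omega
    · exact lt_of_lt_of_le h (sorted_getD_mono l hs _ j hkj hj)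

-- a list with such a boundary has exactly k elements ≤ v
lemma countP_le_eq (l : List Int) (v : Int) :
    ∀ k, k ≤ l.length → (∀ j, j < k → l.getD j 0 ≤ v) →
    (∀ j, k ≤ j → j < l.length → v < l.getD j 0) →
    l.countP (fun s => s ≤ v) = k := by
  induction l with
  | nil => intro k hk _ _; simpa using hk.antisymm (Nat.zero_le _) |>.symm
  | cons a t ih =>
    intro k hk hlow hhigh
    cases k with
    | zero =>
      have ha : v < a := by simpa using hhigh 0 (Nat.zero_le _) (by simp)
      rw [List.countP_cons]
      have : t.countP (fun s => s ≤ v) = 0 :=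
        ih 0 (Nat.zero_le _) (by omega)
          (fun j _ hj => by simpa using hhigh (j + 1) (by omega) (by simpa using hj))
      simp [this, not_le.mpr ha]
    | succ k' =>
      have ha : a ≤ v := by simpa using hlow 0 (by omega)
      rw [List.countP_cons]
      have : t.countP (fun s => s ≤ v) = k' :=
        ih k' (by simpa using hk) (fun j hj => by simpa using hlow (j + 1) (by omega))
          (fun j hkj hj => by simpa using hhigh (j + 1) (by omega) (by simpa using hj))
      simp [this, ha]

-- number of elements strictly greater than v, via the bisect result
lemma countP_gt_eq_sub (l : List Int) (v : Int) (hs : l.Pairwise (· ≤ ·)) :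
    l.countP (fun s => v < s) = l.length - bisect l v 0 l.length := by
  obtain ⟨hk, hlow, hhigh⟩ := bisect_spec l v hs
  have hle : l.countP (fun s => s ≤ v) = bisect l v 0 l.length := countP_le_eq l v _ hk hlow hhigh
  have : l.countP (fun s => v < s) = l.countP (fun s => !(s ≤ v)) := by
    apply List.countP_congr; intro x _; simp [not_le]
  rw [this]
  have hsum := List.length_eq_countP_add_countP (fun s => decide (s ≤ v)) (l := l)
  have hcong : List.countP (fun s => !decide (s ≤ v)) l
      = List.countP (fun a => decide ¬(decide (a ≤ v) = true)) l := by
    apply List.countP_congr; intro x _; simp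
  omega

-- membership bounds for the two halves around the bisect position
lemma mem_take_bisect_le (l : List Int) (v : Int) (hs : l.Pairwise (· ≤ ·)) :
    ∀ x ∈ l.take (bisect l v 0 l.length), x ≤ v := by
  obtain ⟨hk, hlow, -⟩ := bisect_spec l v hs
  intro x hx
  obtain ⟨j, hj, rfl⟩ := List.mem_iff_getElem.mp hx
  have hj' : j < bisect l v 0 l.length := by simpa using (List.length_take ▸ hj : j < min _ l.length) |>.trans_le (min_le_left _ _)
  rw [List.getElem_take]
  rw [← List.getD_eq_getElem l 0 (by simp at hj; omega)]
  exact hlow j (by simp at hj; omega)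

lemma mem_drop_bisect_gt (l : List Int) (v : Int) (hs : l.Pairwise (· ≤ ·)) :
    ∀ y ∈ l.drop (bisect l v 0 l.length), v < y := by
  obtain ⟨hk, -, hhigh⟩ := bisect_spec l v hs
  intro y hy
  obtain ⟨j, hj, rfl⟩ := List.mem_iff_getElem.mp hy
  rw [List.getElem_drop]
  rw [← List.getD_eq_getElem l 0 (by simp at hj; omega)]
  exact hhigh _ (by omega) (by simp at hj; omega)

-- inserting at the bisect position keeps the list sorted
lemma pairwise_insert_bisect (l : List Int) (v : Int) (hs : l.Pairwise (· ≤ ·)) :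
    (l.take (bisect l v 0 l.length) ++ v :: l.drop (bisect l v 0 l.length)).Pairwise (· ≤ ·) := by
  rw [List.pairwise_append]
  refine ⟨hs.sublist (List.take_sublist _ _), ?_, ?_⟩
  · rw [List.pairwise_cons]
    exact ⟨fun y hy => le_of_lt (mem_drop_bisect_gt l v hs y hy),
      hs.sublist (List.drop_sublist _ _)⟩
  · intro x hx y hy
    have hxv := mem_take_bisect_le l v hs x hx
    rcases List.mem_cons.mp hy with rfl | hy'
    · exact hxv
    · exact hxv.trans (le_of_lt (mem_drop_bisect_gt l v hs y hy'))

-- PySem.List.insert at the bisect position, as take/cons/drop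
lemma insert_bisect_eq (l : List Int) (v w : Int) (hs : l.Pairwise (· ≤ ·)) :
    PySem.List.insert l ((bisect l w 0 l.length : Nat) : Int) v
      = l.take (bisect l w 0 l.length) ++ v :: l.drop (bisect l w 0 l.length) :=
  PySem.List.insert_natCast l _ v (bisect_spec l w hs).1

-- permutation: the inserted list is a permutation of v :: l
lemma perm_take_cons_drop (l : List Int) (v : Int) (k : Nat) :
    (l.take k ++ v :: l.drop k).Perm (v :: l) :=
  (List.perm_middle).trans (by rw [List.take_append_drop])

-- the main coupled loop invariant: after the first accepted job, B's fused state
-- tracks (plot-so-far of A's result, prefix sum of pre, sorted permutation of starts)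
lemma loop_main (executing_dist : List Int) (m : Int) :
    ∀ (rest pre : List Int) (r : List (Int × Int)) (starts x y : List Int) (idle le : Int),
      pre ≠ [] → r ≠ [] →
      starts.Pairwise (· ≤ ·) → starts.Perm (r.map Prod.fst) →
      r.foldl pStep ([], [], 0, none) = (x, y, idle, some le) →
      ((PySem.List.enumerate rest (pre.length : Int)).foldl (bStep executing_dist m)
          (x, y, idle, some le, pre.sum, starts)).1
        = (((PySem.List.enumerate rest (pre.length : Int)).foldl
            (aStep (pre ++ rest) executing_dist m) r).foldl pStep ([], [], 0, none)).1
      ∧ ((PySem.List.enumerate rest (pre.length : Int)).foldl (bStep executing_dist m)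
          (x, y, idle, some le, pre.sum, starts)).2.1
        = (((PySem.List.enumerate rest (pre.length : Int)).foldl
            (aStep (pre ++ rest) executing_dist m) r).foldl pStep ([], [], 0, none)).2.1 := by
  intro rest
  induction rest with
  | nil =>
    intro pre r starts x y idle le hpre hr hsort hperm hfold
    simp [hfold]
  | cons inc rest' ih =>
    intro pre r starts x y idle le hpre hr hsort hperm hfold
    rw [PySem.List.enumerate_cons]
    -- the last end time recorded by the plotting fold
    have hle : le = (r.getLast hr).2 := by
      have := pStep_foldl_last r hr ([], [], 0, none)
      rw [hfold] at this
      exact Option.some_injective _ this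
    have hidx : ¬ ((pre.length : Int)) = 0 := by
      simpa using fun h => hpre (List.length_eq_zero_iff.mp h)
    -- A's arrival time is the prefix sum
    have harr : (PySem.List.slice (pre ++ inc :: rest') none (some (pre.length : Int))).sum
        = pre.sum := by
      rw [PySem.List.slice_to_natCast, List.take_left]
    -- A's start equals B's start
    have hstart : find_exec_time pre.sum r = max pre.sum le := by
      rw [find_exec_time, PySem.List.pyGet?_neg_one, List.getLast?_eq_some_getLast hr, hle]
      rfl
    -- both queue counts agree
    have hk := (bisect_spec starts pre.sum hsort).1
    have hcount : (r.map (fun st => if st.1 > pre.sum then (1 : Int) else 0)).sum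
        = (starts.length : Int) - (bisect starts pre.sum 0 starts.length : Int) := by
      rw [queued_eq_countP, ← hperm.countP_eq, countP_gt_eq_sub starts pre.sum hsort]
      have := hperm.length_eq
      push_cast [Nat.cast_sub hk]
      ring
    simp only [List.foldl_cons, aStep, bStep, hidx, if_false, harr, hstart, hcount]
    have h1 : ((pre.length : Int)) + 1 = (((pre ++ [inc]).length : Int)) := by
      push_cast [List.length_append, List.length_cons, List.length_nil]; ring
    have h2 : pre.sum + inc = (pre ++ [inc]).sum := by simp
    have h3 : pre ++ inc :: rest' = (pre ++ [inc]) ++ rest' := by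
      simp [List.append_assoc]
    by_cases hq : (starts.length : Int) - (bisect starts pre.sum 0 starts.length : Int) > m
    · -- job rejected on both sides
      simp only [if_pos hq]
      rw [h1, h2, h3]
      exact ih (pre ++ [inc]) r starts x y idle le (by simp) hr hsort hperm hfold
    · -- job accepted on both sides
      simp only [if_neg hq]
      set exc := PySem.List.pyGetD executing_dist (pre.length : Int) 0 with hexc
      set start := max pre.sum le with hstartdef
      have hins : PySem.List.insert starts ((bisect starts start 0 starts.length : Nat) : Int) start
          = starts.take (bisect starts start 0 starts.length)
            ++ start :: starts.drop (bisect starts start 0 starts.length) :=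
        insert_bisect_eq starts start start hsort
      have hsort' := pairwise_insert_bisect starts start hsort
      have hperm' : (starts.take (bisect starts start 0 starts.length)
            ++ start :: starts.drop (bisect starts start 0 starts.length)).Perm
          ((r ++ [(start, start + exc)]).map Prod.fst) := by
        refine (perm_take_cons_drop starts start _).trans ?_
        simp only [List.map_append, List.map_cons, List.map_nil]
        exact (hperm.cons start).trans (List.perm_append_singleton start (r.map Prod.fst)).symm
      have hfold' : (r ++ [(start, start + exc)]).foldl pStep ([], [], 0, none)
          = (x ++ [start + exc], y ++ [idle + max 0 (start - le)],
             idle + max 0 (start - le), some (start + exc)) := by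
        rw [List.foldl_append, hfold]
        rfl
      rw [h1, h2, h3, hins]
      exact ih (pre ++ [inc]) (r ++ [(start, start + exc)]) _ _ _ _ _
        (by simp) (by simp) hsort' hperm' hfold'

-- ===== VERDICT (by name: the statement is the Claim_ definition above) =====
theorem idle_plot_spec : Claim_equal_idle_plot := by
  intro incoming_dist executing_dist m _hdom _hpre
  unfold Spec_idle_plot
  cases incoming_dist with
  | nil => rfl
  | cons inc rest =>
    rw [idle_plot, idle_plot_alt, system_run]
    rw [PySem.List.enumerate_cons]
    simp only [List.foldl_cons]
    have ha : aStep (inc :: rest) executing_dist m [] (0, inc)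
        = [(inc, inc + PySem.List.pyGetD executing_dist 0 0)] := by
      simp [aStep]
    have hb0 : bisect [] inc 0 0 = 0 := by rw [bisect]; simp
    have hb : bStep executing_dist m ([], [], 0, none, 0, []) (0, inc)
        = ([inc + PySem.List.pyGetD executing_dist 0 0], [inc], inc,
           some (inc + PySem.List.pyGetD executing_dist 0 0), 0 + inc, [inc]) := by
      simp only [bStep, List.length_nil, hb0]
      rw [PySem.List.insert_natCast [] 0 inc (by simp)]
      rfl
    rw [ha, hb]
    set exc0 := PySem.List.pyGetD executing_dist 0 0 with hexc0
    have hmain := loop_main executing_dist m rest [inc]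
      [(inc, inc + exc0)] [inc] [inc + exc0] [inc] inc (inc + exc0)
      (by simp) (by simp) (by simp) (by simp)
      (by rw [List.foldl_cons]; rfl)
    have hlen : ((([inc] : List Int).length : Nat) : Int) = 0 + 1 := by simp
    have hsum : ([inc] : List Int).sum = 0 + inc := by simp
    have happ : ([inc] : List Int) ++ rest = inc :: rest := by simp
    rw [hlen, hsum, happ] at hmain
    exact Prod.ext hmain.1.symm hmain.2.symm
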